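-- pv_equiv track=rewrite | github.com/ishikav23/rNMP_ARS_analysis | checkTimeInputs.py | remove_ribosomal
-- ===== SOURCE A (Python) =====
-- def remove_ribosomal(windows):
--     # ribosomal information
--     chrom = 'chrXII'
--     s = 451576
--     e = 467570
--     # block
--     win = []
--     for l in windows:
--         if s >= l[2] or e <= l[1]:
--             win.append(l)
--         elif l[1] < s < l[2] <= e:
--             win.append((l[0], l[1], s, l[3], l[4], l[5]))
--         elif s <= l[1] <= e < l[2]:
--             win.append((l[0], e, l[2], l[3], l[4], l[5]))
--         elif l[1] < s < e < l[2]: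
--             win.append((l[0], l[1], s, l[3], l[4], l[5]))
--             win.append((l[0], e, l[2], l[3], l[4], l[5]))
--     return win
-- ===== SOURCE B (Python) =====
-- def remove_ribosomal(windows):
--     # ribosomal information
--     s = 451576
--     e = 467570
--     # worklist: clip the left remnant off, re-enqueue the right remnant for reprocessing
--     out = []
--     stack = list(windows)[::-1]
--     while stack:
--         l = stack.pop()
--         if s >= l[2] or e <= l[1]:
--             out.append(l)
--             continue
--         if l[1] < s:
--             out.append((l[0], l[1], s, l[3], l[4], l[5]))
--         if e < l[2]:
--             stack.append((l[0], e, l[2], l[3], l[4], l[5]))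
--     return out
-- ===== Notes on version B (the rewrite author's own statement) =====
-- stated objective: alternative
-- what changed: Replaces the 5-way elif case split with a worklist algorithm: pop a window from a stack, emit it if disjoint, otherwise emit only the left remnant and push the right remnant back onto the stack to be reprocessed (it is then disjoint and emitted whole).
import Mathlib
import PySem

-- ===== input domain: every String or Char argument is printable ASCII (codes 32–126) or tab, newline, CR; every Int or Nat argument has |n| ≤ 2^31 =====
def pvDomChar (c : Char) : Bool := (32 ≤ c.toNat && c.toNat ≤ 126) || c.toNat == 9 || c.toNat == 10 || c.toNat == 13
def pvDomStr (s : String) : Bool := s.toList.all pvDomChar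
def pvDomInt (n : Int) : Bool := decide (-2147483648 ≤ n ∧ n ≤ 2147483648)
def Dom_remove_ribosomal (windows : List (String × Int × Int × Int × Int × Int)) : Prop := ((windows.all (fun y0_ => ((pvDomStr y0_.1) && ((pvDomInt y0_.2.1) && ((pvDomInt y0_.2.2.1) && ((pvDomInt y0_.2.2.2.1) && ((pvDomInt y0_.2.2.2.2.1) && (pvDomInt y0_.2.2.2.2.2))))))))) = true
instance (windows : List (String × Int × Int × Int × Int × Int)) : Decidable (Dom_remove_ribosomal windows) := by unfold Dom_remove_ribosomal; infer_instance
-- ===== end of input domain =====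

-- B replaces A's 5-way elif case split by a worklist loop that emits the left remnant and
-- re-enqueues the right remnant onto the stack for reprocessing (alternative, same cost).


-- ===== PORT A =====
-- literal transliteration of A: accumulator loop, 4-branch elif chain
def remove_ribosomal (windows : List (String × Int × Int × Int × Int × Int)) : List (String × Int × Int × Int × Int × Int) :=
  let s : Int := 451576
  let e : Int := 467570
  windows.foldl (fun win l =>
    if s ≥ l.2.2.1 ∨ e ≤ l.2.1 then
      win ++ [l]
    else if l.2.1 < s ∧ s < l.2.2.1 ∧ l.2.2.1 ≤ e then
      win ++ [(l.1, l.2.1, s, l.2.2.2.1, l.2.2.2.2.1, l.2.2.2.2.2)]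
    else if s ≤ l.2.1 ∧ l.2.1 ≤ e ∧ e < l.2.2.1 then
      win ++ [(l.1, e, l.2.2.1, l.2.2.2.1, l.2.2.2.2.1, l.2.2.2.2.2)]
    else if l.2.1 < s ∧ s < e ∧ e < l.2.2.1 then
      win ++ [(l.1, l.2.1, s, l.2.2.2.1, l.2.2.2.2.1, l.2.2.2.2.2),
              (l.1, e, l.2.2.1, l.2.2.2.1, l.2.2.2.2.1, l.2.2.2.2.2)]
    else win) []

-- ===== PORT B =====
-- termination measure: a window that will push a right remnant costs 2, any other 1
def rrCost (l : String × Int × Int × Int × Int × Int) : Nat :=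
  if ¬((451576 : Int) ≥ l.2.2.1 ∨ (467570 : Int) ≤ l.2.1) ∧ (467570 : Int) < l.2.2.1 then 2 else 1

theorem rrCost_pos (l : String × Int × Int × Int × Int × Int) : 0 < rrCost l := by
  unfold rrCost; split <;> omega

-- B's while-loop over the stack; the Python stack pops from the end of the reversed
-- list, which is the head of the original list, so the Lean stack is that list itself
def rrLoop (stack : List (String × Int × Int × Int × Int × Int))
    (out : List (String × Int × Int × Int × Int × Int)) : List (String × Int × Int × Int × Int × Int) :=
  match stack with
  | [] => out
  | l :: rest =>
    if (451576 : Int) ≥ l.2.2.1 ∨ (467570 : Int) ≤ l.2.1 then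
      rrLoop rest (out ++ [l])
    else
      if (467570 : Int) < l.2.2.1 then
        rrLoop ((l.1, 467570, l.2.2.1, l.2.2.2.1, l.2.2.2.2.1, l.2.2.2.2.2) :: rest)
          (if l.2.1 < (451576 : Int) then
            out ++ [(l.1, l.2.1, 451576, l.2.2.2.1, l.2.2.2.2.1, l.2.2.2.2.2)] else out)
      else
        rrLoop rest
          (if l.2.1 < (451576 : Int) then
            out ++ [(l.1, l.2.1, 451576, l.2.2.2.1, l.2.2.2.2.1, l.2.2.2.2.2)] else out)
termination_by (stack.map rrCost).sum
decreasing_by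
  · have := rrCost_pos l; simp [List.map_cons]; omega
  · simp only [List.map_cons, List.sum_cons]
    have h1 : rrCost (l.1, (467570 : Int), l.2.2.1, l.2.2.2.1, l.2.2.2.2.1, l.2.2.2.2.2) = 1 := by
      unfold rrCost; simp
    have h2 : rrCost l = 2 := by unfold rrCost; rw [if_pos ⟨by omega, by omega⟩]
    omega
  · have := rrCost_pos l; simp [List.map_cons]; omega

def remove_ribosomal_alt (windows : List (String × Int × Int × Int × Int × Int)) : List (String × Int × Int × Int × Int × Int) :=
  rrLoop windows []

-- ===== PRECONDITION & SPEC =====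
def Spec_remove_ribosomal (windows : List (String × Int × Int × Int × Int × Int)) (out : List (String × Int × Int × Int × Int × Int)) : Prop := out = remove_ribosomal_alt windows
instance (windows : List (String × Int × Int × Int × Int × Int)) (out : List (String × Int × Int × Int × Int × Int)) : Decidable (Spec_remove_ribosomal windows out) := by unfold Spec_remove_ribosomal; infer_instance

-- ===== CLAIM (what is proved, stated in full; the proofs are below) =====
def Claim_equal_remove_ribosomal : Prop := ∀ (windows : List (String × Int × Int × Int × Int × Int)), Dom_remove_ribosomal windows → Spec_remove_ribosomal windows (remove_ribosomal windows)

-- ===== LEMMAS AND PROOFS =====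

-- the per-window contribution of A's elif chain
def rrPieces (l : String × Int × Int × Int × Int × Int) : List (String × Int × Int × Int × Int × Int) :=
  if (451576 : Int) ≥ l.2.2.1 ∨ (467570 : Int) ≤ l.2.1 then
    [l]
  else if l.2.1 < 451576 ∧ (451576 : Int) < l.2.2.1 ∧ l.2.2.1 ≤ 467570 then
    [(l.1, l.2.1, 451576, l.2.2.2.1, l.2.2.2.2.1, l.2.2.2.2.2)]
  else if (451576 : Int) ≤ l.2.1 ∧ l.2.1 ≤ 467570 ∧ (467570 : Int) < l.2.2.1 then
    [(l.1, 467570, l.2.2.1, l.2.2.2.1, l.2.2.2.2.1, l.2.2.2.2.2)]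
  else if l.2.1 < 451576 ∧ (451576 : Int) < 467570 ∧ (467570 : Int) < l.2.2.1 then
    [(l.1, l.2.1, 451576, l.2.2.2.1, l.2.2.2.2.1, l.2.2.2.2.2),
     (l.1, 467570, l.2.2.1, l.2.2.2.1, l.2.2.2.2.1, l.2.2.2.2.2)]
  else []

theorem remove_ribosomal_eq_flatMap (windows : List (String × Int × Int × Int × Int × Int)) :
    remove_ribosomal windows = windows.flatMap rrPieces := by
  unfold remove_ribosomal
  dsimp only
  have hb : (fun (win : List (String × Int × Int × Int × Int × Int)) l =>
      if (451576 : Int) ≥ l.2.2.1 ∨ (467570 : Int) ≤ l.2.1 then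
        win ++ [l]
      else if l.2.1 < 451576 ∧ (451576 : Int) < l.2.2.1 ∧ l.2.2.1 ≤ 467570 then
        win ++ [(l.1, l.2.1, 451576, l.2.2.2.1, l.2.2.2.2.1, l.2.2.2.2.2)]
      else if (451576 : Int) ≤ l.2.1 ∧ l.2.1 ≤ 467570 ∧ (467570 : Int) < l.2.2.1 then
        win ++ [(l.1, 467570, l.2.2.1, l.2.2.2.1, l.2.2.2.2.1, l.2.2.2.2.2)]
      else if l.2.1 < 451576 ∧ (451576 : Int) < 467570 ∧ (467570 : Int) < l.2.2.1 then
        win ++ [(l.1, l.2.1, 451576, l.2.2.2.1, l.2.2.2.2.1, l.2.2.2.2.2),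
                (l.1, 467570, l.2.2.1, l.2.2.2.1, l.2.2.2.2.1, l.2.2.2.2.2)]
      else win)
      = fun win l => win ++ rrPieces l := by
    funext win l
    unfold rrPieces
    split_ifs <;> simp
  rw [hb, PySem.List.foldl_append_eq_flatMap]
  simp

-- loop invariant for B: the worklist loop appends exactly A's per-window pieces
theorem rrLoop_eq (stack out : List (String × Int × Int × Int × Int × Int)) :
    rrLoop stack out = out ++ stack.flatMap rrPieces := by
  fun_induction rrLoop stack out with
  | case1 out => simp
  | case2 out l rest h ih =>
    rw [ih]
    have hp : rrPieces l = [l] := by unfold rrPieces; rw [if_pos h]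
    simp [hp]
  | case3 out l rest h h2 ih =>
    simp only [dite_eq_ite] at ih
    rw [ih]
    have hrem : rrPieces (l.1, (467570 : Int), l.2.2.1, l.2.2.2.1, l.2.2.2.2.1, l.2.2.2.2.2)
        = [(l.1, (467570 : Int), l.2.2.1, l.2.2.2.1, l.2.2.2.2.1, l.2.2.2.2.2)] := by
      unfold rrPieces; simp
    rw [not_or, not_le, not_le] at h
    have hp : rrPieces l =
        (if l.2.1 < (451576 : Int) then
          [(l.1, l.2.1, 451576, l.2.2.2.1, l.2.2.2.2.1, l.2.2.2.2.2)] else []) ++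
        [(l.1, (467570 : Int), l.2.2.1, l.2.2.2.1, l.2.2.2.2.1, l.2.2.2.2.2)] := by
      unfold rrPieces
      split_ifs <;> first | rfl | (exfalso; omega)
    simp only [List.flatMap_cons, hrem, hp]
    split_ifs <;> simp
  | case4 out l rest h h2 ih =>
    simp only [dite_eq_ite] at ih
    rw [ih]
    rw [not_or, not_le, not_le] at h
    have hp : rrPieces l =
        (if l.2.1 < (451576 : Int) then
          [(l.1, l.2.1, 451576, l.2.2.2.1, l.2.2.2.2.1, l.2.2.2.2.2)] else []) := by
      unfold rrPieces
      split_ifs <;> first | rfl | (exfalso; omega)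
    simp only [List.flatMap_cons, hp]
    split_ifs <;> simp

-- ===== VERDICT (by name: the statement is the Claim_ definition above) =====
theorem remove_ribosomal_spec : Claim_equal_remove_ribosomal := by
  intro windows _
  unfold Spec_remove_ribosomal remove_ribosomal_alt
  rw [remove_ribosomal_eq_flatMap, rrLoop_eq]
  simp
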